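-- pv_equiv track=rewrite | github.com/ChenxuKwok/llm_benchmark | data.py | align_edit_script
-- ===== SOURCE A (Python) =====
-- from typing import List, Tuple, Dict, Any
--
-- def align_edit_script(src: List[str], tgt: List[str]) -> Tuple[List[Tuple[str, str, str]], List[str]]:
--     n, m = len(src), len(tgt)
--     dp = [[0] * (m + 1) for _ in range(n + 1)]
--     bt = [[None] * (m + 1) for _ in range(n + 1)]
--
--     for i in range(1, n + 1):
--         dp[i][0] = i
--         bt[i][0] = "D"
--     for j in range(1, m + 1):
--         dp[0][j] = j
--         bt[0][j] = "I"
--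
--     for i in range(1, n + 1):
--         src_i = src[i - 1]
--         dp_i = dp[i]
--         dp_prev = dp[i - 1]
--         bt_i = bt[i]
--         for j in range(1, m + 1):
--             sub_cost = dp_prev[j - 1] + (0 if src_i == tgt[j - 1] else 1)
--             del_cost = dp_prev[j] + 1
--             ins_cost = dp_i[j - 1] + 1
--
--             best = min(sub_cost, del_cost, ins_cost)
--             dp_i[j] = best
--
--             if best == sub_cost:
--                 bt_i[j] = "=" if src_i == tgt[j - 1] else "S"
--             elif best == del_cost:
--                 bt_i[j] = "D"
--             else:
--                 bt_i[j] = "I"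
--
--     i, j = n, m
--     ops = []
--     while i > 0 or j > 0:
--         op = bt[i][j]
--         if op == "=":
--             ops.append(("=", src[i - 1], tgt[j - 1]))
--             i -= 1
--             j -= 1
--         elif op == "S":
--             ops.append(("S", src[i - 1], tgt[j - 1]))
--             i -= 1
--             j -= 1
--         elif op == "D":
--             ops.append(("D", src[i - 1], "∅"))
--             i -= 1
--         elif op == "I":
--             ops.append(("I", "∅", tgt[j - 1]))
--             j -= 1
--         else:
--             break
--
--     ops.reverse()
--
--     lines = []
--     for op, a, b in ops:
--         if op == "=":
--             continue
--         if op == "S":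
--             lines.append(f"SUB {a} -> {b}")
--         elif op == "D":
--             lines.append(f"DEL {a}")
--         elif op == "I":
--             lines.append(f"INS {b}")
--
--     return ops, lines
-- ===== SOURCE B (Python) =====
-- from typing import List, Tuple
--
-- def align_edit_script(src: List[str], tgt: List[str]) -> Tuple[List[Tuple[str, str, str]], List[str]]:
--     # Forward DP carrying the edit script: every cell holds (cost, chain), where
--     # chain is a shared cons-list of ops (newest first): None | (op, parent_chain).
--     # No backtrack table, no backward walk.
--     row = [(0, None)]
--     for j, t in enumerate(tgt, 1):
--         row.append((j, (("I", "\u2205", t), row[-1][1])))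
--     for i, s in enumerate(src, 1):
--         above = row
--         row = [(i, (("D", s, "\u2205"), above[0][1]))]
--         for j, t in enumerate(tgt, 1):
--             sub = above[j - 1][0] + (0 if s == t else 1)
--             dele = above[j][0] + 1
--             ins = row[-1][0] + 1
--             best = min(sub, dele, ins)
--             if best == sub:
--                 row.append((best, (("=" if s == t else "S", s, t), above[j - 1][1])))
--             elif best == dele:
--                 row.append((best, (("D", s, "\u2205"), above[j][1])))
--             else:
--                 row.append((best, (("I", "\u2205", t), row[-1][1])))
--     chain = row[-1][1]
--     ops = []
--     while chain is not None:
--         ops.append(chain[0])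
--         chain = chain[1]
--     ops.reverse()
--     lines = [f"SUB {a} -> {b}" if op == "S" else f"DEL {a}" if op == "D" else f"INS {b}"
--              for op, a, b in ops if op in ("S", "D", "I")]
--     return ops, lines
-- ===== Notes on version B (the rewrite author's own statement) =====
-- stated objective: alternative
-- what changed: B replaces A's backtrack-table-plus-backward-walk with a forward DP in which every cell carries (cost, edit script so far) as a shared cons-chain (newest op first, O(1) per cell) using A's tie-break priority (sub, then delete, then insert); the answer is read off the final cell and reversed, so there is no bt table and no backward while loop over it.
import Mathlib
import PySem

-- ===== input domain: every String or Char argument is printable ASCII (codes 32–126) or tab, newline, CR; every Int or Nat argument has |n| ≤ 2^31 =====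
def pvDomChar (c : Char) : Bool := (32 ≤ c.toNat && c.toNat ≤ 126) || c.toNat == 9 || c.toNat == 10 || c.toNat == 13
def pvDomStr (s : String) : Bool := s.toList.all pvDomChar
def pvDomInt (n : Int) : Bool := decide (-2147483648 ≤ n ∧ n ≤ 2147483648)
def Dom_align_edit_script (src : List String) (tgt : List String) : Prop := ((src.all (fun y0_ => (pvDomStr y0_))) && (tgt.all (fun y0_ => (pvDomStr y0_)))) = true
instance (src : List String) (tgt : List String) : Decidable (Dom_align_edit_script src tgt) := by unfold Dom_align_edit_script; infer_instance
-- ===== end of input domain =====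

-- B replaces A's backtrack table and backward walk by a forward DP whose cells carry
-- (cost, script so far); the script is read off the final cell (objective: alternative).

-- ===== PORT A =====
-- inner dp/bt loop over one row: state (diag = dp[i-1][j-1], rest of dp[i-1], rest of tgt, cur = dp[i][j-1])
def rowA (s : String) : Int → List Int → List String → Int → (List Int × List String)
  | diag, p :: ps, t :: ts, cur =>
    let sub := diag + (if s = t then 0 else 1)
    let del := p + 1
    let ins := cur + 1
    let best := min sub (min del ins)
    let op := if best = sub then (if s = t then "=" else "S") else if best = del then "D" else "I"
    let r := rowA s p ps ts best
    (best :: r.1, op :: r.2)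
  | _, _, _, _ => ([], [])

-- outer loop over src rows, building (dp row, bt row) pairs for i = 1..n
def buildA (tgt : List String) : List String → Int → List Int → List (List Int × List (Option String))
  | [], _, _ => []
  | s :: rest, i, prev =>
    match prev with
    | [] => []  -- unreachable: the previous dp row is never empty
    | d :: ds =>
      let r := rowA s d ds tgt i
      (i :: r.1, some "D" :: r.2.map some) :: buildA tgt rest (i + 1) (i :: r.1)

def tablesA (src tgt : List String) : List (List Int × List (Option String)) :=
  ((List.range (tgt.length + 1)).map Int.ofNat,
   none :: List.replicate tgt.length (some "I")) :: buildA tgt src 1 ((List.range (tgt.length + 1)).map Int.ofNat)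

-- the while loop reading bt; fuel n+m+1 bounds its iteration count (each step lowers i+j or breaks)
def backA (src tgt : List String) (T : List (List Int × List (Option String))) :
    Nat → Nat → Nat → List (String × String × String) → List (String × String × String)
  | 0, _, _, acc => acc
  | fuel + 1, i, j, acc =>
    if i = 0 ∧ j = 0 then acc
    else
      let op := ((T.getD i ([], [])).2).getD j none
      if op = some "=" then backA src tgt T fuel (i - 1) (j - 1) (acc ++ [("=", src.getD (i - 1) "", tgt.getD (j - 1) "")])
      else if op = some "S" then backA src tgt T fuel (i - 1) (j - 1) (acc ++ [("S", src.getD (i - 1) "", tgt.getD (j - 1) "")])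
      else if op = some "D" then backA src tgt T fuel (i - 1) j (acc ++ [("D", src.getD (i - 1) "", "∅")])
      else if op = some "I" then backA src tgt T fuel i (j - 1) (acc ++ [("I", "∅", tgt.getD (j - 1) "")])
      else acc

def linesA (ops : List (String × String × String)) : List String :=
  ops.foldl (fun ls x =>
    if x.1 = "=" then ls
    else if x.1 = "S" then ls ++ ["SUB " ++ x.2.1 ++ " -> " ++ x.2.2]
    else if x.1 = "D" then ls ++ ["DEL " ++ x.2.1]
    else if x.1 = "I" then ls ++ ["INS " ++ x.2.2]
    else ls) []

def align_edit_script (src : List String) (tgt : List String) : (List (String × String × String)) × List String :=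
  let T := tablesA src tgt
  let ops := (backA src tgt T (src.length + tgt.length + 1) src.length tgt.length []).reverse
  (ops, linesA ops)

-- ===== PORT B =====
-- row 0 of the script-carrying DP: cell (0, j) = (j, I-ops for tgt[0..j), newest first)
def rowInit : List String → Int → List (String × String × String) → List (Int × List (String × String × String))
  | [], _, _ => []
  | t :: ts, j, ops =>
    (j + 1, ("I", "∅", t) :: ops) :: rowInit ts (j + 1) (("I", "∅", t) :: ops)

-- inner loop: `left` is the cell just built, the above row is consumed pairwise (diag, up)
def rowNextB (s : String) : (Int × List (String × String × String)) →
    List (Int × List (String × String × String)) → List String →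
    List (Int × List (String × String × String))
  | left, d :: u :: rest, t :: ts =>
    let sub := d.1 + (if s = t then 0 else 1)
    let del := u.1 + 1
    let ins := left.1 + 1
    let best := min sub (min del ins)
    let cell :=
      if best = sub then (best, ((if s = t then "=" else "S"), s, t) :: d.2)
      else if best = del then (best, ("D", s, "∅") :: u.2)
      else (best, ("I", "∅", t) :: left.2)
    cell :: rowNextB s cell (u :: rest) ts
  | _, _, _ => []

-- outer loop over src: replace the row by the next script-carrying row
def buildRowsB (tgt : List String) : List String → Int →
    List (Int × List (String × String × String)) → List (Int × List (String × String × String))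
  | [], _, row => row
  | s :: rest, i, above =>
    let first := (i + 1, ("D", s, "∅") :: (above.headD (0, [])).2)
    buildRowsB tgt rest (i + 1) (first :: rowNextB s first above tgt)

-- the while loop unwinding the final chain into ops (chain = Python None/(op,parent) cons cells,
-- ported as a Lean list built by the same cons operations)
def collectB : List (String × String × String) → List (String × String × String) →
    List (String × String × String)
  | [], acc => acc
  | x :: c, acc => collectB c (acc ++ [x])

def linesB (ops : List (String × String × String)) : List String :=
  ops.filterMap (fun x =>
    if x.1 = "S" then some ("SUB " ++ x.2.1 ++ " -> " ++ x.2.2)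
    else if x.1 = "D" then some ("DEL " ++ x.2.1)
    else if x.1 = "I" then some ("INS " ++ x.2.2)
    else none)

def align_edit_script_alt (src : List String) (tgt : List String) : (List (String × String × String)) × List String :=
  let row := buildRowsB tgt src 0 ((0, []) :: rowInit tgt 0 [])
  let ops := (collectB (row.getLastD (0, [])).2 []).reverse
  (ops, linesB ops)

-- ===== PRECONDITION & SPEC =====
def Spec_align_edit_script (src : List String) (tgt : List String) (out : (List (String × String × String)) × List String) : Prop := out = align_edit_script_alt src tgt
instance (src : List String) (tgt : List String) (out : (List (String × String × String)) × List String) : Decidable (Spec_align_edit_script src tgt out) := by unfold Spec_align_edit_script; infer_instance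

-- ===== CLAIM (what is proved, stated in full; the proofs are below) =====
def Claim_equal_align_edit_script : Prop := ∀ (src : List String) (tgt : List String), Dom_align_edit_script src tgt → Spec_align_edit_script src tgt (align_edit_script src tgt)

-- ===== LEMMAS AND PROOFS =====

-- dp cell accessor of A's tables
def dpc (src tgt : List String) (i j : Nat) : Int :=
  ((tablesA src tgt).getD i ([], [])).1.getD j 0

-- the edit script the backtrack emits from cell (i, j), defined by recursion on i + j
def scriptS (src tgt : List String) : Nat → Nat → List (String × String × String)
  | 0, 0 => []
  | i + 1, 0 => ("D", src.getD i "", "∅") :: scriptS src tgt i 0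
  | 0, j + 1 => ("I", "∅", tgt.getD j "") :: scriptS src tgt 0 j
  | i + 1, j + 1 =>
    let s := src.getD i ""
    let t := tgt.getD j ""
    if dpc src tgt (i + 1) (j + 1) = dpc src tgt i j + (if s = t then 0 else 1) then
      ((if s = t then "=" else "S"), s, t) :: scriptS src tgt i j
    else if dpc src tgt (i + 1) (j + 1) = dpc src tgt i (j + 1) + 1 then
      ("D", s, "∅") :: scriptS src tgt i (j + 1)
    else
      ("I", "∅", t) :: scriptS src tgt (i + 1) j
  termination_by i j => i + j

def cellSpec (src tgt : List String) (i j : Nat) : Int × List (String × String × String) :=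
  (dpc src tgt i j, scriptS src tgt i j)

lemma scriptS_zero_succ (src tgt : List String) (l : Nat) :
    scriptS src tgt 0 (l + 1) = ("I", "∅", tgt.getD l "") :: scriptS src tgt 0 l := by
  rw [scriptS]

lemma scriptS_succ_zero (src tgt : List String) (k : Nat) :
    scriptS src tgt (k + 1) 0 = ("D", src.getD k "", "∅") :: scriptS src tgt k 0 := by
  rw [scriptS]

lemma scriptS_succ_succ (src tgt : List String) (k l : Nat) :
    scriptS src tgt (k + 1) (l + 1)
      = (if dpc src tgt (k + 1) (l + 1)
            = dpc src tgt k l + (if src.getD k "" = tgt.getD l "" then 0 else 1) then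
           ((if src.getD k "" = tgt.getD l "" then "=" else "S"), src.getD k "", tgt.getD l "")
             :: scriptS src tgt k l
         else if dpc src tgt (k + 1) (l + 1) = dpc src tgt k (l + 1) + 1 then
           ("D", src.getD k "", "∅") :: scriptS src tgt k (l + 1)
         else ("I", "∅", tgt.getD l "") :: scriptS src tgt (k + 1) l) := by
  rw [scriptS]

lemma rowA_len (s : String) : ∀ (ts : List String) (ps : List Int) (diag cur : Int),
    (rowA s diag ps ts cur).1.length = min ps.length ts.length ∧
    (rowA s diag ps ts cur).2.length = min ps.length ts.length := by
  intro ts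
  induction ts with
  | nil => intro ps diag cur; cases ps <;> simp [rowA]
  | cons t ts ih =>
    intro ps diag cur
    cases ps with
    | nil => simp [rowA]
    | cons p ps' =>
      simp only [rowA, List.length_cons]
      constructor <;> simp [(ih ps' p _).1, (ih ps' p _).2]

lemma buildA_rows_len (tgt : List String) : ∀ (rest : List String) (i : Int) (prev : List Int),
    prev.length = tgt.length + 1 →
    ∀ e ∈ buildA tgt rest i prev, e.1.length = tgt.length + 1 ∧ e.2.length = tgt.length + 1 := by
  intro rest
  induction rest with
  | nil => intro i prev _ e he; simp [buildA] at he
  | cons s rest ih =>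
    intro i prev hp e he
    cases prev with
    | nil => simp at hp
    | cons d ds =>
      simp only [buildA, List.mem_cons] at he
      have hlen : (rowA s d ds tgt i).1.length = tgt.length ∧ (rowA s d ds tgt i).2.length = tgt.length := by
        have h := rowA_len s tgt ds d i
        simp only [List.length_cons] at hp
        constructor <;> omega
      rcases he with he | he
      · subst he; simp [hlen.1, hlen.2]
      · exact ih (i + 1) _ (by simp [hlen.1]) e he

lemma buildA_length (tgt : List String) : ∀ (rest : List String) (i : Int) (prev : List Int),
    prev ≠ [] → (buildA tgt rest i prev).length = rest.length := by
  intro rest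
  induction rest with
  | nil => intro i prev _; simp [buildA]
  | cons s rest ih =>
    intro i prev hp
    cases prev with
    | nil => exact absurd rfl hp
    | cons d ds => simp [buildA, ih (i + 1) (i :: (rowA s d ds tgt i).1) (by simp)]

def stepA (s : String) (prev : List Int) (tgt : List String) (i : Int) : List Int × List (Option String) :=
  let r := rowA s (prev.headD 0) prev.tail tgt i
  (i :: r.1, some "D" :: r.2.map some)

lemma buildA_getD (tgt : List String) : ∀ (rest : List String) (k : Nat) (i : Int) (prev : List Int),
    prev ≠ [] → k < rest.length →
    (buildA tgt rest i prev).getD k ([], [])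
      = stepA (rest.getD k "") ((prev :: (buildA tgt rest i prev).map Prod.fst).getD k []) tgt (i + k) := by
  intro rest
  induction rest with
  | nil => intro k i prev _ hk; simp at hk
  | cons s rest ih =>
    intro k i prev hp hk
    cases prev with
    | nil => exact absurd rfl hp
    | cons d ds =>
      cases k with
      | zero => simp [buildA, stepA]
      | succ k =>
        simp only [buildA, List.getD_cons_succ, List.map_cons]
        rw [ih k (i + 1) (i :: (rowA s d ds tgt i).1) (by simp) (by simpa using hk)]
        have hih : i + 1 + (k : Int) = i + ((k : Nat) + 1 : Nat) := by push_cast; ring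
        rw [hih]

lemma getD_map_fst (L : List (List Int × List (Option String))) : ∀ (k : Nat),
    (L.map Prod.fst).getD k [] = (L.getD k ([], [])).1 := by
  induction L with
  | nil => intro k; simp
  | cons e L ih =>
    intro k
    cases k with
    | zero => simp
    | succ k => simp only [List.map_cons, List.getD_cons_succ]; exact ih k

lemma getD_map_some {α : Type} (L : List α) (l : Nat) (d : α) (h : l < L.length) :
    (L.map some).getD l none = some (L.getD l d) := by
  induction L generalizing l with
  | nil => simp at h
  | cons a L ih => cases l <;> simp_all

lemma tablesA_getD_succ (src tgt : List String) (k : Nat) (hk : k < src.length) :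
    (tablesA src tgt).getD (k + 1) ([], [])
      = stepA (src.getD k "") ((tablesA src tgt).getD k ([], [])).1 tgt (1 + (k : Int)) := by
  have h := buildA_getD tgt src k 1 ((List.range (tgt.length + 1)).map Int.ofNat)
      (by simp [List.range_succ_eq_map]) hk
  have hT : ((List.range (tgt.length + 1)).map Int.ofNat
        :: (buildA tgt src 1 ((List.range (tgt.length + 1)).map Int.ofNat)).map Prod.fst)
      = (tablesA src tgt).map Prod.fst := by
    simp [tablesA]
  conv_lhs => rw [show (tablesA src tgt).getD (k + 1) ([], [])
      = (buildA tgt src 1 ((List.range (tgt.length + 1)).map Int.ofNat)).getD k ([], []) from by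
        simp [tablesA]]
  rw [h, hT, getD_map_fst]

lemma rows_len (src tgt : List String) : ∀ (k : Nat), k ≤ src.length →
    ((tablesA src tgt).getD k ([], [])).1.length = tgt.length + 1 := by
  intro k hk
  cases k with
  | zero => simp [tablesA]
  | succ k =>
    have hlen : (buildA tgt src 1 ((List.range (tgt.length + 1)).map Int.ofNat)).length = src.length :=
      buildA_length tgt src 1 _ (by simp [List.range_succ_eq_map])
    simp only [tablesA, List.getD_cons_succ]
    rw [List.getD_eq_getElem _ _ (by rw [hlen]; omega)]
    exact (buildA_rows_len tgt src 1 _ (by simp) _ (List.getElem_mem _)).1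

-- row-level characterisation: dp and bt cells in terms of the three candidate costs
lemma rowA_get (s : String) : ∀ (k : Nat) (ts : List String) (ps : List Int) (diag cur : Int),
    k < ts.length → k < ps.length →
    ((rowA s diag ps ts cur).1.getD k 0
        = min ((diag :: ps).getD k 0 + (if s = ts.getD k "" then 0 else 1))
            (min ((diag :: ps).getD (k + 1) 0 + 1) ((cur :: (rowA s diag ps ts cur).1).getD k 0 + 1)))
    ∧ ((rowA s diag ps ts cur).2.getD k ""
        = (if (rowA s diag ps ts cur).1.getD k 0
              = (diag :: ps).getD k 0 + (if s = ts.getD k "" then 0 else 1) then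
             (if s = ts.getD k "" then "=" else "S")
           else if (rowA s diag ps ts cur).1.getD k 0 = (diag :: ps).getD (k + 1) 0 + 1 then "D"
           else "I")) := by
  intro k
  induction k with
  | zero =>
    intro ts ps diag cur hts hps
    cases ts with
    | nil => simp at hts
    | cons t ts' =>
      cases ps with
      | nil => simp at hps
      | cons p ps' => simp [rowA]
  | succ k ih =>
    intro ts ps diag cur hts hps
    cases ts with
    | nil => simp at hts
    | cons t ts' =>
      cases ps with
      | nil => simp at hps
      | cons p ps' =>
        simp only [rowA, List.getD_cons_succ]
        exact ih ts' ps' p _ (by simpa using hts) (by simpa using hps)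

-- boundary dp cells
lemma dp_row0 (src tgt : List String) (j : Nat) (hj : j ≤ tgt.length) :
    dpc src tgt 0 j = (j : Int) := by
  unfold dpc
  simp only [tablesA, List.getD_cons_zero]
  rw [List.getD_eq_getElem _ _ (by simp; omega)]
  simp

lemma dp_col0 (src tgt : List String) (i : Nat) (hi : i ≤ src.length) :
    dpc src tgt i 0 = (i : Int) := by
  cases i with
  | zero => simpa using dp_row0 src tgt 0 (by omega)
  | succ k =>
    unfold dpc
    rw [tablesA_getD_succ src tgt k (by omega)]
    simp [stepA]
    ring

-- interior dp recurrence and bt characterisation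
lemma dp_cell (src tgt : List String) (i j : Nat)
    (hi1 : 0 < i) (hi : i ≤ src.length) (hj1 : 0 < j) (hj : j ≤ tgt.length) :
    dpc src tgt i j
      = min (dpc src tgt (i - 1) (j - 1) + (if src.getD (i - 1) "" = tgt.getD (j - 1) "" then 0 else 1))
          (min (dpc src tgt (i - 1) j + 1) (dpc src tgt i (j - 1) + 1)) := by
  obtain ⟨k, rfl⟩ : ∃ k, i = k + 1 := ⟨i - 1, by omega⟩
  obtain ⟨l, rfl⟩ : ∃ l, j = l + 1 := ⟨j - 1, by omega⟩
  simp only [Nat.add_sub_cancel]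
  unfold dpc
  rw [tablesA_getD_succ src tgt k (by omega)]
  have hplen : ((tablesA src tgt).getD k ([], [])).1.length = tgt.length + 1 :=
    rows_len src tgt k (by omega)
  obtain ⟨dh, dt, hprev⟩ : ∃ dh dt, ((tablesA src tgt).getD k ([], [])).1 = dh :: dt := by
    cases hp : ((tablesA src tgt).getD k ([], [])).1 with
    | nil => rw [hp] at hplen; simp at hplen
    | cons a b => exact ⟨a, b, rfl⟩
  rw [hprev]
  have hdt : dt.length = tgt.length := by
    rw [hprev] at hplen; simpa using hplen
  simp only [stepA, List.headD_cons, List.tail_cons, List.getD_cons_succ]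
  exact (rowA_get (src.getD k "") l tgt dt dh (1 + (k : Int)) (by omega) (by omega)).1

lemma bt_cell (src tgt : List String) (i j : Nat)
    (hi1 : 0 < i) (hi : i ≤ src.length) (hj1 : 0 < j) (hj : j ≤ tgt.length) :
    ((tablesA src tgt).getD i ([], [])).2.getD j none
      = some (if dpc src tgt i j
                = dpc src tgt (i - 1) (j - 1)
                  + (if src.getD (i - 1) "" = tgt.getD (j - 1) "" then 0 else 1)
              then (if src.getD (i - 1) "" = tgt.getD (j - 1) "" then "=" else "S")
              else if dpc src tgt i j = dpc src tgt (i - 1) j + 1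
              then "D" else "I") := by
  obtain ⟨k, rfl⟩ : ∃ k, i = k + 1 := ⟨i - 1, by omega⟩
  obtain ⟨l, rfl⟩ : ∃ l, j = l + 1 := ⟨j - 1, by omega⟩
  simp only [Nat.add_sub_cancel]
  unfold dpc
  rw [tablesA_getD_succ src tgt k (by omega)]
  have hplen : ((tablesA src tgt).getD k ([], [])).1.length = tgt.length + 1 :=
    rows_len src tgt k (by omega)
  obtain ⟨dh, dt, hprev⟩ : ∃ dh dt, ((tablesA src tgt).getD k ([], [])).1 = dh :: dt := by
    cases hp : ((tablesA src tgt).getD k ([], [])).1 with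
    | nil => rw [hp] at hplen; simp at hplen
    | cons a b => exact ⟨a, b, rfl⟩
  rw [hprev]
  have hdt : dt.length = tgt.length := by
    rw [hprev] at hplen; simpa using hplen
  simp only [stepA, List.headD_cons, List.tail_cons, List.getD_cons_succ]
  have hg := rowA_get (src.getD k "") l tgt dt dh (1 + (k : Int)) (by omega) (by omega)
  rw [getD_map_some _ l "" (by rw [(rowA_len _ _ _ _ _).2]; omega)]
  rw [hg.2]
  simp only [List.getD_cons_succ]

-- boundary bt cells
lemma bt_row0 (src tgt : List String) (j : Nat) (hj1 : 0 < j) (hj : j ≤ tgt.length) :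
    ((tablesA src tgt).getD 0 ([], [])).2.getD j none = some "I" := by
  obtain ⟨l, rfl⟩ : ∃ l, j = l + 1 := ⟨j - 1, by omega⟩
  simp only [tablesA, List.getD_cons_zero, List.getD_cons_succ]
  rw [List.getD_eq_getElem _ _ (by simp; omega)]
  simp

lemma bt_col0 (src tgt : List String) (i : Nat) (hi1 : 0 < i) (hi : i ≤ src.length) :
    ((tablesA src tgt).getD i ([], [])).2.getD 0 none = some "D" := by
  obtain ⟨k, rfl⟩ : ∃ k, i = k + 1 := ⟨i - 1, by omega⟩
  rw [tablesA_getD_succ src tgt k (by omega)]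
  simp [stepA]

-- one-step unfolding of the backtrack loop (definitional)
lemma backA_succ (src tgt : List String) (T : List (List Int × List (Option String)))
    (fuel i j : Nat) (acc : List (String × String × String)) :
    backA src tgt T (fuel + 1) i j acc
      = if i = 0 ∧ j = 0 then acc
        else if (T.getD i ([], [])).2.getD j none = some "=" then
          backA src tgt T fuel (i - 1) (j - 1) (acc ++ [("=", src.getD (i - 1) "", tgt.getD (j - 1) "")])
        else if (T.getD i ([], [])).2.getD j none = some "S" then
          backA src tgt T fuel (i - 1) (j - 1) (acc ++ [("S", src.getD (i - 1) "", tgt.getD (j - 1) "")])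
        else if (T.getD i ([], [])).2.getD j none = some "D" then
          backA src tgt T fuel (i - 1) j (acc ++ [("D", src.getD (i - 1) "", "∅")])
        else if (T.getD i ([], [])).2.getD j none = some "I" then
          backA src tgt T fuel i (j - 1) (acc ++ [("I", "∅", tgt.getD (j - 1) "")])
        else acc := rfl

-- A's backtrack loop emits exactly scriptS
lemma backA_scriptS (src tgt : List String) : ∀ (fuel i j : Nat) (acc : List (String × String × String)),
    i ≤ src.length → j ≤ tgt.length → i + j ≤ fuel →
    backA src tgt (tablesA src tgt) fuel i j acc = acc ++ scriptS src tgt i j := by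
  intro fuel
  induction fuel with
  | zero =>
    intro i j acc hi hj hf
    have hi0 : i = 0 := by omega
    have hj0 : j = 0 := by omega
    subst hi0; subst hj0
    simp [backA, scriptS]
  | succ fuel ih =>
    intro i j acc hi hj hf
    by_cases h0 : i = 0 ∧ j = 0
    · obtain ⟨rfl, rfl⟩ := h0
      simp [backA, scriptS]
    · rcases Nat.eq_zero_or_pos i with hi0 | hipos
      · subst hi0
        obtain ⟨l, rfl⟩ : ∃ l, j = l + 1 := ⟨j - 1, by omega⟩
        have hI := bt_row0 src tgt (l + 1) (by omega) hj
        rw [backA_succ, if_neg h0, hI,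
            if_neg (by decide), if_neg (by decide), if_neg (by decide), if_pos rfl]
        simp only [Nat.add_sub_cancel]
        rw [ih 0 l _ (by omega) (by omega) (by omega)]
        simp [scriptS]
      · rcases Nat.eq_zero_or_pos j with hj0 | hjpos
        · subst hj0
          obtain ⟨k, rfl⟩ : ∃ k, i = k + 1 := ⟨i - 1, by omega⟩
          have hD := bt_col0 src tgt (k + 1) (by omega) hi
          rw [backA_succ, if_neg h0, hD,
              if_neg (by decide), if_neg (by decide), if_pos rfl]
          simp only [Nat.add_sub_cancel]
          rw [ih k 0 _ (by omega) (by omega) (by omega)]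
          simp [scriptS]
        · obtain ⟨k, rfl⟩ : ∃ k, i = k + 1 := ⟨i - 1, by omega⟩
          obtain ⟨l, rfl⟩ : ∃ l, j = l + 1 := ⟨j - 1, by omega⟩
          rw [backA_succ, if_neg h0,
              bt_cell src tgt (k + 1) (l + 1) (by omega) hi (by omega) hj]
          simp only [Nat.add_sub_cancel]
          by_cases h1 : dpc src tgt (k + 1) (l + 1)
              = dpc src tgt k l + (if src.getD k "" = tgt.getD l "" then 0 else 1)
          · by_cases hst : src.getD k "" = tgt.getD l ""
            · rw [if_pos h1, if_pos hst, if_pos rfl]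
              rw [ih k l _ (by omega) (by omega) (by omega),
                  scriptS_succ_succ, if_pos h1, if_pos hst]
              simp
            · rw [if_pos h1, if_neg hst, if_neg (by decide), if_pos rfl]
              rw [ih k l _ (by omega) (by omega) (by omega),
                  scriptS_succ_succ, if_pos h1, if_neg hst]
              simp
          · by_cases h2 : dpc src tgt (k + 1) (l + 1) = dpc src tgt k (l + 1) + 1
            · rw [if_neg h1, if_pos h2, if_neg (by decide), if_neg (by decide), if_pos rfl]
              rw [ih k (l + 1) _ (by omega) (by omega) (by omega),
                  scriptS_succ_succ, if_neg h1, if_pos h2]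
              simp
            · rw [if_neg h1, if_neg h2, if_neg (by decide), if_neg (by decide), if_neg (by decide),
                  if_pos rfl]
              rw [ih (k + 1) l _ (by omega) (by omega) (by omega),
                  scriptS_succ_succ, if_neg h1, if_neg h2]
              simp

-- B's initial row matches cellSpec on row 0
lemma rowInit_spec (src tgt : List String) : ∀ (ts : List String) (k : Nat),
    tgt.drop k = ts →
    rowInit ts (k : Int) (scriptS src tgt 0 k)
      = (List.range' (k + 1) (tgt.length - k)).map (cellSpec src tgt 0) := by
  intro ts
  induction ts with
  | nil =>
    intro k hk
    have hm : tgt.length ≤ k := by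
      have := congrArg List.length hk
      simp at this; omega
    simp [rowInit, Nat.sub_eq_zero_of_le hm]
  | cons t ts ih =>
    intro k hk
    have hlen : tgt.length - k = ts.length + 1 := by
      have := congrArg List.length hk
      simp at this; omega
    have ht : tgt.getD k "" = t := by
      have h0 : (tgt.drop k)[0]? = tgt[k + 0]? := List.getElem?_drop
      rw [hk] at h0
      simp only [List.getD_eq_getElem?_getD]
      simp at h0
      simp [← h0]
    have hdrop : tgt.drop (k + 1) = ts := by
      have := congrArg List.tail hk
      simpa [List.tail_drop] using this
    have hhead : ((k : Int) + 1, ("I", "∅", t) :: scriptS src tgt 0 k) = cellSpec src tgt 0 (k + 1) := by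
      unfold cellSpec
      rw [dp_row0 src tgt (k + 1) (by omega), scriptS_zero_succ, ht,
          show ((k : Int) + 1) = ((k + 1 : Nat) : Int) from by push_cast; ring]
    have htail : rowInit ts ((k : Int) + 1) (("I", "∅", t) :: scriptS src tgt 0 k)
        = (List.range' (k + 1 + 1) (tgt.length - (k + 1))).map (cellSpec src tgt 0) := by
      rw [show ("I", "∅", t) :: scriptS src tgt 0 k = scriptS src tgt 0 (k + 1) from by
            rw [scriptS_zero_succ, ht],
          show (k : Int) + 1 = ((k + 1 : Nat) : Int) from by push_cast; ring]
      exact ih (k + 1) hdrop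
    simp only [rowInit, hlen, List.range'_succ, List.map_cons]
    rw [hhead, htail, show tgt.length - (k + 1) = ts.length from by omega]

-- B's inner loop matches cellSpec on row i (1 ≤ i)
lemma rowNextB_spec (src tgt : List String) (i : Nat) (hi1 : 0 < i) (hi : i ≤ src.length) :
    ∀ (ts : List String) (k : Nat),
    tgt.drop k = ts →
    rowNextB (src.getD (i - 1) "") (cellSpec src tgt i k)
        ((List.range' k (tgt.length + 1 - k)).map (cellSpec src tgt (i - 1))) ts
      = (List.range' (k + 1) (tgt.length - k)).map (cellSpec src tgt i) := by
  intro ts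
  induction ts with
  | nil =>
    intro k hk
    have hm : tgt.length ≤ k := by
      have := congrArg List.length hk
      simp at this; omega
    simp only [Nat.sub_eq_zero_of_le hm, List.range'_zero, List.map_nil]
    rcases h : (List.range' k (tgt.length + 1 - k)).map (cellSpec src tgt (i - 1))
      with _ | ⟨a, _ | ⟨b, rest⟩⟩ <;> simp [rowNextB]
  | cons t ts ih =>
    intro k hk
    have hlen : tgt.length - k = ts.length + 1 := by
      have := congrArg List.length hk
      simp at this; omega
    have hklt : k < tgt.length := by omega
    have ht : tgt.getD k "" = t := by
      have h0 : (tgt.drop k)[0]? = tgt[k + 0]? := List.getElem?_drop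
      rw [hk] at h0
      simp only [List.getD_eq_getElem?_getD]
      simp at h0
      simp [← h0]
    have hdrop : tgt.drop (k + 1) = ts := by
      have := congrArg List.tail hk
      simpa [List.tail_drop] using this
    obtain ⟨p, rfl⟩ : ∃ p, i = p + 1 := ⟨i - 1, by omega⟩
    simp only [Nat.add_sub_cancel] at *
    -- expose the first two cells of the above row
    have hr1 : tgt.length + 1 - k = (ts.length + 1) + 1 := by omega
    rw [hr1, List.range'_succ, List.range'_succ]
    simp only [List.map_cons, rowNextB, cellSpec]
    -- the freshly built cell is cellSpec (p+1) (k+1)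
    have hrec := dp_cell src tgt (p + 1) (k + 1) (by omega) hi (by omega) (by omega)
    simp only [Nat.add_sub_cancel] at hrec
    have hcell : (if min (dpc src tgt p k + (if src.getD p "" = t then 0 else 1))
            (min (dpc src tgt p (k + 1) + 1) (dpc src tgt (p + 1) k + 1))
          = dpc src tgt p k + (if src.getD p "" = t then 0 else 1) then
         (min (dpc src tgt p k + (if src.getD p "" = t then 0 else 1))
            (min (dpc src tgt p (k + 1) + 1) (dpc src tgt (p + 1) k + 1)),
          ((if src.getD p "" = t then "=" else "S"), src.getD p "", t) :: scriptS src tgt p k)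
       else if min (dpc src tgt p k + (if src.getD p "" = t then 0 else 1))
            (min (dpc src tgt p (k + 1) + 1) (dpc src tgt (p + 1) k + 1))
          = dpc src tgt p (k + 1) + 1 then
         (min (dpc src tgt p k + (if src.getD p "" = t then 0 else 1))
            (min (dpc src tgt p (k + 1) + 1) (dpc src tgt (p + 1) k + 1)),
          ("D", src.getD p "", "∅") :: scriptS src tgt p (k + 1))
       else
         (min (dpc src tgt p k + (if src.getD p "" = t then 0 else 1))
            (min (dpc src tgt p (k + 1) + 1) (dpc src tgt (p + 1) k + 1)),
          ("I", "∅", t) :: scriptS src tgt (p + 1) k))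
        = (dpc src tgt (p + 1) (k + 1), scriptS src tgt (p + 1) (k + 1)) := by
      rw [ht] at hrec
      rw [scriptS_succ_succ, ht, ← hrec]
      split_ifs <;> rfl
    rw [hcell]
    have hih := ih (k + 1) hdrop
    rw [show tgt.length + 1 - (k + 1) = ts.length + 1 from by omega,
        show tgt.length - (k + 1) = ts.length from by omega] at hih
    simp only [List.range'_succ, List.map_cons, cellSpec] at hih
    rw [hlen]
    simp only [List.range'_succ, List.map_cons, cellSpec]
    rw [hih]

-- B's outer loop carries the row invariant to row n
lemma buildRowsB_spec (src tgt : List String) : ∀ (rest : List String) (i : Nat),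
    src.drop i = rest → i ≤ src.length →
    buildRowsB tgt rest (i : Int) ((List.range' 0 (tgt.length + 1)).map (cellSpec src tgt i))
      = (List.range' 0 (tgt.length + 1)).map (cellSpec src tgt src.length) := by
  intro rest
  induction rest with
  | nil =>
    intro i hdrop hi
    have : src.length ≤ i := by
      have := congrArg List.length hdrop
      simp at this; omega
    have hie : i = src.length := by omega
    subst hie
    simp [buildRowsB]
  | cons s rest ih =>
    intro i hdrop hi
    have hilt : i < src.length := by
      have := congrArg List.length hdrop
      simp at this; omega
    have hs : src.getD i "" = s := by
      have h0 : (src.drop i)[0]? = src[i + 0]? := List.getElem?_drop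
      rw [hdrop] at h0
      simp only [List.getD_eq_getElem?_getD]
      simp at h0
      simp [← h0]
    have hdrop' : src.drop (i + 1) = rest := by
      have := congrArg List.tail hdrop
      simpa [List.tail_drop] using this
    simp only [buildRowsB]
    have hhead : (((List.range' 0 (tgt.length + 1)).map (cellSpec src tgt i)).headD (0, [])).2
        = scriptS src tgt i 0 := by
      simp [List.range'_succ, cellSpec]
    have hfirst : ((i : Int) + 1, ("D", s, "∅")
          :: (((List.range' 0 (tgt.length + 1)).map (cellSpec src tgt i)).headD (0, [])).2)
        = cellSpec src tgt (i + 1) 0 := by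
      rw [hhead]
      unfold cellSpec
      rw [dp_col0 src tgt (i + 1) (by omega), scriptS_succ_zero, hs,
          show ((i : Int) + 1) = ((i + 1 : Nat) : Int) from by push_cast; ring]
    rw [hfirst]
    have hrow := rowNextB_spec src tgt (i + 1) (by omega) (by omega) tgt 0 (by simp)
    simp only [Nat.add_sub_cancel, Nat.sub_zero, hs] at hrow
    rw [hrow]
    have hcons : cellSpec src tgt (i + 1) 0 :: (List.range' (0 + 1) tgt.length).map (cellSpec src tgt (i + 1))
        = (List.range' 0 (tgt.length + 1)).map (cellSpec src tgt (i + 1)) := by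
      simp [List.range'_succ]
    rw [hcons,
        show ((i : Int) + 1) = ((i + 1 : Nat) : Int) from by push_cast; ring,
        ih (i + 1) hdrop' (by omega)]

lemma getLastD_range'_map {α : Type} (f : Nat → α) : ∀ (len k : Nat) (d : α),
    ((List.range' k (len + 1)).map f).getLastD d = f (k + len) := by
  intro len
  induction len with
  | zero => intro k d; simp
  | succ len ih =>
    intro k d
    rw [List.range'_succ]
    simp only [List.map_cons, List.getLastD_cons]
    rw [show k + (len + 1) = (k + 1) + len from by omega]
    exact ih (k + 1) (f k)

-- the two line builders agree
lemma linesA_acc : ∀ (ops : List (String × String × String)) (acc : List String),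
    ops.foldl (fun ls x =>
      if x.1 = "=" then ls
      else if x.1 = "S" then ls ++ ["SUB " ++ x.2.1 ++ " -> " ++ x.2.2]
      else if x.1 = "D" then ls ++ ["DEL " ++ x.2.1]
      else if x.1 = "I" then ls ++ ["INS " ++ x.2.2]
      else ls) acc = acc ++ linesB ops := by
  intro ops
  induction ops with
  | nil => intro acc; simp [linesB]
  | cons x ops ih =>
    intro acc
    simp only [List.foldl_cons]
    by_cases he : x.1 = "="
    · rw [if_pos he, ih]
      simp [linesB, he]
    · rw [if_neg he]
      by_cases hs : x.1 = "S"
      · rw [if_pos hs, ih, List.append_assoc]; simp [linesB, hs]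
      · rw [if_neg hs]
        by_cases hd : x.1 = "D"
        · rw [if_pos hd, ih, List.append_assoc]; simp [linesB, hd]
        · rw [if_neg hd]
          by_cases hii : x.1 = "I"
          · rw [if_pos hii, ih, List.append_assoc]; simp [linesB, hii]
          · rw [if_neg hii, ih]; simp [linesB, hs, hd, hii]

lemma collectB_eq : ∀ (c acc : List (String × String × String)), collectB c acc = acc ++ c := by
  intro c
  induction c with
  | nil => intro acc; simp [collectB]
  | cons x c ih => intro acc; rw [collectB, ih]; simp

lemma lines_eq (ops : List (String × String × String)) : linesA ops = linesB ops := by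
  unfold linesA
  rw [linesA_acc]
  simp

-- ===== VERDICT (by name: the statement is the Claim_ definition above) =====
theorem align_edit_script_spec : Claim_equal_align_edit_script := by
  intro src tgt _
  unfold Spec_align_edit_script
  simp only [align_edit_script, align_edit_script_alt]
  have hrow0 : ((0 : Int), ([] : List (String × String × String))) :: rowInit tgt 0 []
      = (List.range' 0 (tgt.length + 1)).map (cellSpec src tgt 0) := by
    have h := rowInit_spec src tgt tgt 0 (by simp)
    rw [show scriptS src tgt 0 0 = [] from by rw [scriptS]] at h
    simp only [Nat.cast_zero, Nat.sub_zero] at h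
    rw [List.range'_succ, List.map_cons, ← h]
    rw [show cellSpec src tgt 0 0 = ((0 : Int), ([] : List (String × String × String))) from by
          unfold cellSpec
          rw [dp_row0 src tgt 0 (by omega), show scriptS src tgt 0 0 = [] from by rw [scriptS]]
          rfl]
  have hbuild := buildRowsB_spec src tgt src 0 (by simp) (by omega)
  simp only [Nat.cast_zero] at hbuild
  rw [hrow0, hbuild,
      getLastD_range'_map (cellSpec src tgt src.length) tgt.length 0
        ((0 : Int), ([] : List (String × String × String)))]
  simp only [Nat.zero_add, cellSpec, collectB_eq, List.nil_append]
  rw [backA_scriptS src tgt (src.length + tgt.length + 1) src.length tgt.length []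
        le_rfl le_rfl (by omega)]
  simp only [List.nil_append]
  rw [lines_eq]
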